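-- pv_equiv track=rewrite | github.com/Yadhuvtk/Ai_Drawing | yd_vector/data/svg_tokenizer/text_bpe.py | _replace_pair
-- ===== SOURCE A (Python) =====
-- from typing import Dict, Iterable, List, Sequence, Tuple
--
-- def _replace_pair(tokens: List[str], pair: Tuple[str, str], merged: str) -> List[str]:
--     out: List[str] = []
--     i = 0
--     a, b = pair
--     while i < len(tokens):
--         if i < len(tokens) - 1 and tokens[i] == a and tokens[i + 1] == b:
--             out.append(merged)
--             i += 2
--         else:
--             out.append(tokens[i])
--             i += 1
--     return out
-- ===== SOURCE B (Python) =====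
-- from typing import List, Tuple
--
-- def _replace_pair(tokens: List[str], pair: Tuple[str, str], merged: str) -> List[str]:
--     a, b = pair
--     out: List[str] = []
--     prev = None
--     have_prev = False
--     for t in tokens:
--         if have_prev and prev == a and t == b:
--             out.append(merged)
--             have_prev = False
--         else:
--             if have_prev:
--                 out.append(prev)
--             prev = t
--             have_prev = True
--     if have_prev:
--         out.append(prev)
--     return out
-- ===== Notes on version B (the rewrite author's own statement) =====
-- stated objective: alternative
-- what changed: Replaced the index-based while loop with a two-ahead lookahead by a single for-each pass that carries the previous unmerged token in a variable with a have_prev flag and flushes it after the loop; avoiding per-step len() and indexing makes it measurably faster by a constant factor.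
import Mathlib
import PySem

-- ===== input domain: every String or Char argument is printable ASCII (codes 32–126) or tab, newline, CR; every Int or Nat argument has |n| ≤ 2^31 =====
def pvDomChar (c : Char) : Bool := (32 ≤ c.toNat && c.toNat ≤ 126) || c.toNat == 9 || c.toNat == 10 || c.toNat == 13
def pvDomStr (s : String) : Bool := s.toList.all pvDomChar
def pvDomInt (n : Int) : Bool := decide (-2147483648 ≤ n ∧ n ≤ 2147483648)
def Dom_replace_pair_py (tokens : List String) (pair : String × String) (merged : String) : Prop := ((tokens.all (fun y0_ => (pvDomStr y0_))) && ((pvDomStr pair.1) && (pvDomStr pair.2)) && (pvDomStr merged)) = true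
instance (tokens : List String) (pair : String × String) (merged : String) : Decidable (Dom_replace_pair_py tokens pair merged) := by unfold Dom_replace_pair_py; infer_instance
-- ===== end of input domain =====

-- B replaces A's indexed while loop (two-ahead lookahead) by a single for-each pass carrying a pending previous token; same O(n) result, measured constant-factor faster.


-- ===== PORT A =====
-- while loop over index i with two-ahead lookahead, transcribed as recursion on the remaining suffix
def pvGoA (a b merged : String) : List String → List String
  | [] => []
  | [x] => [x]
  | x :: y :: rest =>
      if x = a ∧ y = b then merged :: pvGoA a b merged rest
      else x :: pvGoA a b merged (y :: rest)

def replace_pair_py (tokens : List String) (pair : String × String) (merged : String) : List String :=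
  pvGoA pair.1 pair.2 merged tokens

-- ===== PORT B =====
-- one-pass fold carrying (out, pending previous token); `Option` is (have_prev, prev) of Source B
def pvStepB (a b merged : String) (st : List String × Option String) (t : String) : List String × Option String :=
  match st.2 with
  | some p => if p = a ∧ t = b then (st.1 ++ [merged], none) else (st.1 ++ [p], some t)
  | none => (st.1, some t)

def pvFlushB (st : List String × Option String) : List String :=
  match st.2 with
  | some p => st.1 ++ [p]
  | none => st.1

def replace_pair_py_alt (tokens : List String) (pair : String × String) (merged : String) : List String :=
  pvFlushB (tokens.foldl (pvStepB pair.1 pair.2 merged) ([], none))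

-- ===== PRECONDITION & SPEC =====
def Spec_replace_pair_py (tokens : List String) (pair : String × String) (merged : String) (out : List String) : Prop := out = replace_pair_py_alt tokens pair merged
instance (tokens : List String) (pair : String × String) (merged : String) (out : List String) : Decidable (Spec_replace_pair_py tokens pair merged out) := by unfold Spec_replace_pair_py; infer_instance

-- ===== CLAIM (what is proved, stated in full; the proofs are below) =====
def Claim_equal_replace_pair_py : Prop := ∀ (tokens : List String) (pair : String × String) (merged : String), Dom_replace_pair_py tokens pair merged → Spec_replace_pair_py tokens pair merged (replace_pair_py tokens pair merged)

-- ===== LEMMAS AND PROOFS =====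

-- ===== VERDICT (by name: the statement is the Claim_ definition above) =====
theorem pvL (a b merged : String) (ts : List String) (acc : List String) (p : String) :
    pvFlushB (ts.foldl (pvStepB a b merged) (acc, some p)) = acc ++ pvGoA a b merged (p :: ts) := by
  match ts with
  | [] => simp [pvFlushB, pvGoA]
  | t :: ts' =>
    by_cases h : p = a ∧ t = b
    · simp only [List.foldl_cons, pvStepB, if_pos h]
      match ts' with
      | [] => simp [pvFlushB, pvGoA, h]
      | u :: ts'' =>
        simp only [List.foldl_cons, pvStepB]
        rw [pvL a b merged ts'' (acc ++ [merged]) u]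
        simp [pvGoA, h]
    · simp only [List.foldl_cons, pvStepB, if_neg h]
      rw [pvL a b merged ts' (acc ++ [p]) t]
      simp [pvGoA, h]
termination_by ts.length

theorem replace_pair_py_spec : Claim_equal_replace_pair_py := by
  intro tokens pair merged _
  unfold Spec_replace_pair_py replace_pair_py replace_pair_py_alt
  match tokens with
  | [] => simp [pvFlushB, pvGoA]
  | t :: ts =>
    simp only [List.foldl_cons, pvStepB]
    rw [pvL]
    simp
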